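-- pv_equiv track=rewrite | github.com/MahsaRz/AdapLog | Log_parsing/Online_phase/steps/tokenize_online_step.py | splitbychars
-- ===== SOURCE A (Python) =====
-- def splitbychars(s, chars):
--     l = 0
--     tokens = []
--     for r in range(len(s)):
--         if s[r] in chars:
--             tokens.append(s[l:r])
--             tokens.append(s[r])
--             l=r+1
--     tokens.append(s[l:])
--
--     tokens = list(filter(lambda x: x!='', tokens))
--     # import pdb; pdb.set_trace()
--     for i in range(len(tokens)):
--         if all(char.isdigit() for char in tokens[i]):
--             tokens[i] = '<*>'
--     return tokens
-- ===== SOURCE B (Python) =====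
-- def splitbychars(s, chars):
--     def emit(tok):
--         return '<*>' if all(c.isdigit() for c in tok) else tok
--     out = []
--     buf = []
--     for c in s:
--         if c in chars:
--             if buf:
--                 out.append(emit(''.join(buf)))
--                 buf = []
--             out.append(emit(c))
--         else:
--             buf.append(c)
--     if buf:
--         out.append(emit(''.join(buf)))
--     return out
-- ===== Notes on version B (the rewrite author's own statement) =====
-- stated objective: simpler
-- what changed: Replaces the index/slice scan plus a filter pass plus an in-place masking pass by one single pass over the characters with a buffer, emitting each (masked) token as soon as it is complete.
import Mathlib
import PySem

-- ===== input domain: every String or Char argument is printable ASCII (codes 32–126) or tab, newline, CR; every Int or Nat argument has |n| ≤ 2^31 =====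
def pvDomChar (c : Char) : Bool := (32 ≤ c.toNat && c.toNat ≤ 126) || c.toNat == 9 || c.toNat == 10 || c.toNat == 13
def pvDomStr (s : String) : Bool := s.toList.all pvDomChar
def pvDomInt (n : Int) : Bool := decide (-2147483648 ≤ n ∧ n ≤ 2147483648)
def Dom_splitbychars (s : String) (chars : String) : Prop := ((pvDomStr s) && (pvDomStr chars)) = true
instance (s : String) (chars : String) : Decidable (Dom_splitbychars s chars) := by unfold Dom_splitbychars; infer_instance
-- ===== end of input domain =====

-- B replaces A's index/slice scan + filter pass + masking pass by one single pass with a buffer (objective: simpler).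
-- ===== PORT A =====
-- one iteration of A's 'for r in range(len(s))' loop; state = (l, tokens)
def pvStep (cs : List Char) (cset : List Char) (st : Nat × List String) (r : Nat) : Nat × List String :=
  if cs.getD r ' ' ∈ cset then
    (r + 1, st.2 ++ [String.ofList (PySem.List.slice cs (some (st.1 : Int)) (some (r : Int))), String.ofList [cs.getD r ' ']])
  else st

def splitbychars (s : String) (chars : String) : List String :=
  let cs := s.toList
  let res := (List.range cs.length).foldl (pvStep cs chars.toList) (0, [])
  let toks := (res.2 ++ [String.ofList (PySem.List.slice cs (some (res.1 : Int)) none)]).filter (fun x => x ≠ "")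
  toks.map (fun t => if t.toList.all PySem.Chars.isdigit then "<*>" else t)

-- ===== PORT B =====
-- emit(tok): mask an all-digit token
def pvEmit (buf : List Char) : String := if buf.all PySem.Chars.isdigit then "<*>" else String.ofList buf

-- the single pass: remaining characters, current buffer
def pvGo (cset : List Char) : List Char → List Char → List String
  | [], buf => if buf = [] then [] else [pvEmit buf]
  | c :: rest, buf =>
      if c ∈ cset then (if buf = [] then [] else [pvEmit buf]) ++ pvEmit [c] :: pvGo cset rest []
      else pvGo cset rest (buf ++ [c])

def splitbychars_alt (s : String) (chars : String) : List String := pvGo chars.toList s.toList []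

-- ===== PRECONDITION & SPEC =====
def Spec_splitbychars (s : String) (chars : String) (out : List String) : Prop := out = splitbychars_alt s chars
instance (s : String) (chars : String) (out : List String) : Decidable (Spec_splitbychars s chars out) := by unfold Spec_splitbychars; infer_instance

-- ===== CLAIM (what is proved, stated in full; the proofs are below) =====
def Claim_equal_splitbychars : Prop := ∀ (s : String) (chars : String), Dom_splitbychars s chars → Spec_splitbychars s chars (splitbychars s chars)

-- ===== LEMMAS AND PROOFS =====
-- A's raw token stream (before filtering and masking): buffer, remaining characters
def rawToks (cset : List Char) : List Char → List Char → List String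
  | buf, [] => [String.ofList buf]
  | buf, c :: rest =>
      if c ∈ cset then String.ofList buf :: String.ofList [c] :: rawToks cset [] rest
      else rawToks cset (buf ++ [c]) rest

def pvMask (t : String) : String := if t.toList.all PySem.Chars.isdigit then "<*>" else t

theorem mask_ofList (buf : List Char) : pvMask (String.ofList buf) = pvEmit buf := by
  simp [pvMask, pvEmit]

theorem go_eq_raw (cset : List Char) (rest : List Char) : ∀ buf : List Char,
    pvGo cset rest buf = ((rawToks cset buf rest).filter (fun x => x ≠ "")).map pvMask := by
  induction rest with
  | nil =>
      intro buf
      by_cases hb : buf = [] <;> simp [pvGo, rawToks, hb, mask_ofList]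
  | cons c rest ih =>
      intro buf
      by_cases hc : c ∈ cset
      · by_cases hb : buf = [] <;>
          simp [pvGo, rawToks, hc, hb, mask_ofList, ih]
      · simp [pvGo, rawToks, hc, ih]

theorem fold_inv (cs cset : List Char) : ∀ (k : Nat), k ≤ cs.length →
    ((List.range k).foldl (pvStep cs cset) (0, [])).1 ≤ k ∧
    ((List.range k).foldl (pvStep cs cset) (0, [])).2 ++
      rawToks cset ((cs.take k).drop ((List.range k).foldl (pvStep cs cset) (0, [])).1) (cs.drop k)
      = rawToks cset [] cs := by
  intro k
  induction k with
  | zero => intro _; simp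
  | succ k ih =>
      intro hk
      have hklen : k < cs.length := hk
      obtain ⟨h1, h2⟩ := ih (Nat.le_of_lt hklen)
      have hget : cs.getD k ' ' = cs[k] := by simp [List.getD_eq_getElem?_getD, hklen]
      have hdropk : cs.drop k = cs[k] :: cs.drop (k + 1) := List.drop_eq_getElem_cons hklen
      have htake : cs.take (k + 1) = cs.take k ++ [cs[k]] := by
        rw [List.take_add_one, List.getElem?_eq_getElem hklen]; rfl
      rw [List.range_succ, List.foldl_append, List.foldl_cons, List.foldl_nil]
      set st := (List.range k).foldl (pvStep cs cset) ((0 : Nat), ([] : List String)) with hst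
      unfold pvStep
      rw [hget]
      by_cases hc : cs[k] ∈ cset
      · rw [if_pos hc]
        refine ⟨Nat.le_refl _, ?_⟩
        have hbufnew : (cs.take (k + 1)).drop (k + 1) = [] :=
          List.drop_eq_nil_of_le (by simp)
        have hslice : PySem.List.slice cs (some (st.1 : Int))
            (some (k : Int)) = (cs.take k).drop st.1 := by
          rw [PySem.List.slice_natCast, List.drop_take]
        rw [hbufnew, hslice, ← h2, hdropk]
        simp [rawToks, hc]
      · rw [if_neg hc]
        refine ⟨Nat.le_succ_of_le h1, ?_⟩
        have hb : (cs.take (k + 1)).drop st.1 = ((cs.take k).drop st.1) ++ [cs[k]] := by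
          rw [htake, List.drop_append_of_le_length (by simp; omega)]
        rw [hb, ← h2, hdropk]
        have : rawToks cset ((cs.take k).drop st.1 ++ [cs[k]]) (cs.drop (k + 1))
            = rawToks cset ((cs.take k).drop st.1) (cs[k] :: cs.drop (k + 1)) := by
          simp [rawToks, hc]
        rw [this]

-- ===== VERDICT (by name: the statement is the Claim_ definition above) =====
theorem splitbychars_spec : Claim_equal_splitbychars := by
  intro s chars _
  unfold Spec_splitbychars splitbychars splitbychars_alt
  obtain ⟨h1, h2⟩ := fold_inv s.toList chars.toList s.toList.length (Nat.le_refl _)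
  rw [List.take_length, List.drop_length, rawToks] at h2
  have hslice : PySem.List.slice s.toList
      (some ((((List.range s.toList.length).foldl (pvStep s.toList chars.toList) (0, [])).1 : Nat) : Int)) none
      = s.toList.drop ((List.range s.toList.length).foldl (pvStep s.toList chars.toList) (0, [])).1 :=
    PySem.List.slice_from_natCast ..
  simp only [hslice]
  rw [go_eq_raw, ← h2]
  rfl
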